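-- pv_equiv track=rewrite | github.com/gauthierbeaudoux/LeetCode | 1894_StudentReplaceChalk.py | chalkReplacer
-- ===== SOURCE A (Python) =====
-- def chalkReplacer(chalk: list[int], k: int) -> int:
--     somme = sum(chalk)
--     n = k % somme
--     for indice, valeur in enumerate(chalk):
--         if n < valeur:
--             return indice
--         else:
--             n -= valeur
-- ===== SOURCE B (Python) =====
-- def chalkReplacer(chalk: list[int], k: int) -> int:
--     total = sum(chalk)
--     n = k % total
--     # inclusive prefix sums, then binary search (bisect_right) for the
--     # first index whose prefix sum strictly exceeds n
--     prefix = []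
--     acc = 0
--     for v in chalk:
--         acc += v
--         prefix.append(acc)
--     lo, hi = 0, len(prefix)
--     while lo < hi:
--         mid = (lo + hi) // 2
--         if prefix[mid] <= n:
--             lo = mid + 1
--         else:
--             hi = mid
--     return lo
-- ===== Notes on version B (the rewrite author's own statement) =====
-- stated objective: alternative
-- what changed: Replaces the running-subtraction linear scan with a prefix-sum table followed by a hand-written binary search (bisect_right) for the first prefix sum strictly exceeding k % sum(chalk).
-- outside the precondition, e.g. on chalkReplacer([5, -4, 5], 3): A returns 0, B returns 2; on chalkReplacer([-3], 0): A returns None, B returns 1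
import Mathlib
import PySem

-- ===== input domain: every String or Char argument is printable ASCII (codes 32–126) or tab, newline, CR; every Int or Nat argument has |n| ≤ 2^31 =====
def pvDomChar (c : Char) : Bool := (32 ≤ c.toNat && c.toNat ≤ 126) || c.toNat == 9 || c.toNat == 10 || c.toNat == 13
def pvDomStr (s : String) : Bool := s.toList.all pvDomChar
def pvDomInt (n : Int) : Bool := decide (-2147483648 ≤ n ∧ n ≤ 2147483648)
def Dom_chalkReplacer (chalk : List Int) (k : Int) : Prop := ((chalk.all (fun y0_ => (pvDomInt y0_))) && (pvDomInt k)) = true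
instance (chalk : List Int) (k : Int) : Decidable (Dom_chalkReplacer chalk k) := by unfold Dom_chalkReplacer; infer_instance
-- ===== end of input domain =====

-- B replaces A's running-subtraction scan with a prefix-sum table plus a hand-written
-- binary search (bisect_right) for the first prefix sum strictly exceeding k % sum(chalk).

-- ===== PORT A =====
-- the for-loop of A: state (remaining n, current index); when the loop exhausts,
-- Python returns None (no Int); that case is excluded by Pre_, the port returns 0 there
def chalkReplacerLoop : List Int → Int → Int → Int
  | [], _, _ => 0
  | v :: rest, n, i => if n < v then i else chalkReplacerLoop rest (n - v) (i + 1)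

def chalkReplacer (chalk : List Int) (k : Int) : Int :=
  let somme := chalk.sum
  let n := PySem.Int.mod k somme
  chalkReplacerLoop chalk n 0

-- ===== PORT B =====
-- Source B's prefix-building loop
def prefixSums : List Int → Int → List Int
  | [], _ => []
  | v :: rest, acc => (acc + v) :: prefixSums rest (acc + v)

-- Source B's while-loop (hand-written bisect_right), structurally recursive on the fuel
-- hi - lo, an upper bound on the iteration count (the loop body is step-for-step Source B's);
-- 'prefix[mid]' is in range since lo ≤ mid < hi ≤ len
def bsearchFuel : Nat → List Int → Int → Nat → Nat → Nat
  | 0, _, _, lo, _ => lo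
  | fuel + 1, p, n, lo, hi =>
    if lo < hi then
      let mid := (lo + hi) / 2
      if p.getD mid 0 ≤ n then bsearchFuel fuel p n (mid + 1) hi
      else bsearchFuel fuel p n lo mid
    else lo

def bsearch (p : List Int) (n : Int) (lo hi : Nat) : Nat :=
  bsearchFuel (hi - lo) p n lo hi

def chalkReplacer_alt (chalk : List Int) (k : Int) : Int :=
  let total := chalk.sum
  let n := PySem.Int.mod k total
  let pfx := prefixSums chalk 0
  (bsearch pfx n 0 pfx.length : Int)

-- ===== PRECONDITION & SPEC =====
-- Pre_ requires a positive total (A raises ZeroDivisionError on total = 0, and can fall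
-- off the loop returning None on total < 0) and a nonnegative tail, which makes the
-- inclusive prefix sums monotone; with negative amounts after the first — meaningless
-- for chalk counts — A's unsorted linear scan is an index B's binary search legitimately
-- need not match.
def Pre_chalkReplacer (chalk : List Int) (k : Int) : Prop :=
  (∀ x ∈ chalk.tail, 0 ≤ x) ∧ 0 < chalk.sum
instance (chalk : List Int) (k : Int) : Decidable (Pre_chalkReplacer chalk k) := by
  unfold Pre_chalkReplacer; infer_instance

def pvWitness_chalkReplacer : List Int × Int := ([5, 1, 5], 22)

def Spec_chalkReplacer (chalk : List Int) (k : Int) (out : Int) : Prop := out = chalkReplacer_alt chalk k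
instance (chalk : List Int) (k : Int) (out : Int) : Decidable (Spec_chalkReplacer chalk k out) := by unfold Spec_chalkReplacer; infer_instance

-- ===== CLAIM (what is proved, stated in full; the proofs are below) =====
def Claim_equal_chalkReplacer : Prop := ∀ (chalk : List Int) (k : Int), Dom_chalkReplacer chalk k → Pre_chalkReplacer chalk k → Spec_chalkReplacer chalk k (chalkReplacer chalk k)

-- ===== LEMMAS AND PROOFS =====

-- proof-side spec: index of the first position whose inclusive prefix sum exceeds n
def firstExceed : List Int → Int → Nat
  | [], _ => 0
  | v :: rest, n => if n < v then 0 else firstExceed rest (n - v) + 1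

theorem loop_eq_firstExceed (chalk : List Int) (n i : Int)
    (h0 : 0 ≤ n) (hs : n < chalk.sum) :
    chalkReplacerLoop chalk n i = i + (firstExceed chalk n : Int) := by
  induction chalk generalizing n i with
  | nil => simp at hs; omega
  | cons v rest ih =>
    simp only [chalkReplacerLoop, firstExceed]
    by_cases hc : n < v
    · simp [hc]
    · simp only [if_neg hc]
      rw [ih (n - v) (i + 1) (by omega) (by simp [List.sum_cons] at hs; omega)]
      push_cast; ring

theorem prefixSums_length (chalk : List Int) (a : Int) :
    (prefixSums chalk a).length = chalk.length := by
  induction chalk generalizing a with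
  | nil => rfl
  | cons v rest ih => simp [prefixSums, ih]

theorem le_prefixSums_getD (chalk : List Int) (a : Int)
    (hpos : ∀ x ∈ chalk, 0 ≤ x) (j : Nat) (hj : j < chalk.length) :
    a ≤ (prefixSums chalk a).getD j 0 := by
  induction chalk generalizing a j with
  | nil => simp at hj
  | cons v rest ih =>
    have hv : 0 ≤ v := hpos v (by simp)
    cases j with
    | zero => simp [prefixSums]; omega
    | succ j' =>
      simp only [prefixSums, List.getD_cons_succ]
      have := ih (a + v) (fun x hx => hpos x (by simp [hx])) j' (by simpa using hj)
      omega

theorem prefixSums_mono (chalk : List Int) (a : Int)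
    (hpos : ∀ x ∈ chalk.tail, 0 ≤ x) (i j : Nat) (hij : i ≤ j) (hj : j < chalk.length) :
    (prefixSums chalk a).getD i 0 ≤ (prefixSums chalk a).getD j 0 := by
  induction chalk generalizing a i j with
  | nil => simp at hj
  | cons v rest ih =>
    cases i with
    | zero =>
      cases j with
      | zero => exact le_refl _
      | succ j' =>
        simp only [prefixSums, List.getD_cons_zero, List.getD_cons_succ]
        exact le_prefixSums_getD rest (a + v)
          (fun x hx => hpos x (by simpa using hx)) j' (by simpa using hj)
    | succ i' =>
      cases j with
      | zero => omega
      | succ j' =>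
        simp only [prefixSums, List.getD_cons_succ]
        exact ih (a + v)
          (fun x hx => hpos x (by simp [List.tail]; exact List.mem_of_mem_tail hx)) i' j'
          (by omega) (by simpa using hj)

-- firstExceed's characterisation against the prefix-sum table
theorem firstExceed_spec (chalk : List Int) (n a : Int)
    (h0 : 0 ≤ n) (hs : n < chalk.sum) :
    firstExceed chalk n < chalk.length ∧
    (∀ j : Nat, j < firstExceed chalk n → (prefixSums chalk a).getD j 0 ≤ a + n) ∧
    a + n < (prefixSums chalk a).getD (firstExceed chalk n) 0 := by
  induction chalk generalizing n a with
  | nil => simp at hs; omega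
  | cons v rest ih =>
    simp only [firstExceed, prefixSums]
    by_cases hc : n < v
    · simp only [if_pos hc]
      refine ⟨by simp, by omega, by simp; omega⟩
    · simp only [if_neg hc]
      have hrest : n - v < rest.sum := by simp [List.sum_cons] at hs; omega
      obtain ⟨h1, h2, h3⟩ := ih (n - v) (a + v) (by omega) hrest
      refine ⟨by simpa using Nat.succ_lt_succ h1, ?_, ?_⟩
      · intro j hj
        cases j with
        | zero => simp; omega
        | succ j' =>
          simp only [List.getD_cons_succ]
          have := h2 j' (by omega)
          omega
      · simp only [List.getD_cons_succ]
        omega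

-- Source B's binary search returns an index c with p[j] ≤ n for j < c and n < p[c] (if c < len),
-- given a monotone table and the loop's boundary invariants
theorem bsearchFuel_spec (p : List Int) (n : Int)
    (hmono : ∀ i j : Nat, i ≤ j → j < p.length → p.getD i 0 ≤ p.getD j 0) :
    ∀ (fuel lo hi : Nat), hi - lo ≤ fuel → lo ≤ hi → hi ≤ p.length →
    (∀ j : Nat, j < lo → p.getD j 0 ≤ n) →
    (∀ j : Nat, hi ≤ j → j < p.length → n < p.getD j 0) →
    lo ≤ bsearchFuel fuel p n lo hi ∧ bsearchFuel fuel p n lo hi ≤ hi ∧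
    (∀ j : Nat, j < bsearchFuel fuel p n lo hi → p.getD j 0 ≤ n) ∧
    (∀ j : Nat, bsearchFuel fuel p n lo hi ≤ j → j < p.length → n < p.getD j 0) := by
  intro fuel
  induction fuel with
  | zero =>
    intro lo hi hfu hlohi hhi hlo hhi2
    have heq : lo = hi := by omega
    subst heq
    exact ⟨le_refl _, le_refl _, hlo, hhi2⟩
  | succ f ih =>
    intro lo hi hfu hlohi hhi hlo hhi2
    simp only [bsearchFuel]
    by_cases h : lo < hi
    · simp only [if_pos h]
      set mid := (lo + hi) / 2 with hmid
      have hm1 : lo ≤ mid := by omega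
      have hm2 : mid < hi := by omega
      by_cases hc : p.getD mid 0 ≤ n
      · simp only [if_pos hc]
        have hlo' : ∀ j : Nat, j < mid + 1 → p.getD j 0 ≤ n := by
          intro j hj
          by_cases hjlo : j < lo
          · exact hlo j hjlo
          · exact le_trans (hmono j mid (by omega) (by omega)) hc
        obtain ⟨a1, a2, a3, a4⟩ := ih (mid + 1) hi (by omega) (by omega) hhi hlo' hhi2
        exact ⟨by omega, a2, a3, a4⟩
      · simp only [if_neg hc]
        have hhi' : ∀ j : Nat, mid ≤ j → j < p.length → n < p.getD j 0 := by
          intro j hj hjlen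
          exact lt_of_lt_of_le (by omega) (hmono mid j hj hjlen)
        obtain ⟨a1, a2, a3, a4⟩ := ih lo mid (by omega) hm1 (by omega) hlo hhi'
        exact ⟨a1, by omega, a3, a4⟩
    · simp only [if_neg h]
      have heq : lo = hi := by omega
      subst heq
      exact ⟨le_refl _, le_refl _, hlo, hhi2⟩

-- ===== VERDICT (by name: the statement is the Claim_ definition above) =====
theorem chalkReplacer_spec : Claim_equal_chalkReplacer := by
  intro chalk k _ hpre
  obtain ⟨hpos, hsum⟩ := hpre
  unfold Spec_chalkReplacer chalkReplacer chalkReplacer_alt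
  set n := PySem.Int.mod k chalk.sum with hn
  have h0 : 0 ≤ n := PySem.Int.mod_nonneg k hsum
  have hlt : n < chalk.sum := PySem.Int.mod_lt k hsum
  set p := prefixSums chalk 0 with hp
  have hplen : p.length = chalk.length := prefixSums_length chalk 0
  have hmono : ∀ i j : Nat, i ≤ j → j < p.length → p.getD i 0 ≤ p.getD j 0 := by
    intro i j hij hj
    exact prefixSums_mono chalk 0 hpos i j hij (by omega)
  obtain ⟨hfe1, hfe2, hfe3⟩ := firstExceed_spec chalk n 0 h0 hlt
  simp only [zero_add] at hfe2 hfe3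
  obtain ⟨_, _, hb2, hb3⟩ := bsearchFuel_spec p n hmono (p.length - 0) 0 p.length
    (by omega) (by omega) (le_refl _) (fun j hj => absurd hj (by omega))
    (fun j h1 h2 => absurd (lt_of_le_of_lt h1 h2) (lt_irrefl _))
  set c1 := firstExceed chalk n with hc1
  set c2 := bsearchFuel (p.length - 0) p n 0 p.length with hc2
  have hceq : c1 = c2 := by
    by_contra hne
    rcases Nat.lt_or_ge c1 c2 with hlt12 | hge
    · exact absurd (hb2 c1 hlt12) (not_le.mpr hfe3)
    · have hlt21 : c2 < c1 := by omega
      exact absurd (hb3 c2 (le_refl _) (by omega)) (not_lt.mpr (hfe2 c2 hlt21))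
  rw [loop_eq_firstExceed chalk n 0 h0 hlt]
  show 0 + (c1 : Int) = (bsearch p n 0 p.length : Int)
  rw [bsearch]
  rw [hceq]
  simp
  rw [hc2, Nat.sub_zero]
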